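-- pv_equiv track=rewrite | github.com/tthatcher95/INF685 | scripts/primer_hybridization.py | dimerization
-- ===== SOURCE A (Python) =====
-- from itertools import groupby, compress
--
-- def dimerization(primer_1, primer_2):
--     """
--     Returns a dictionary with the highest total dimerization score and
--     the score of the longest run (weighted by C-G vs. A-T pairings).
--     The values are each the maximum (worst-case) possiblities
--     among all alignments of the primers.
--     primer_1 (str, Seq): First primer in 5' to 3' direction
--     primer_2 (str, Seq): Second primer reverse_complemented
--                          in 3' to 5' direction.
--     """
--     p1 = primer_1 + ("*" * (len(primer_2) - 1))
--     p2 = "*" * (len(primer_1) - 1) + primer_2[::-1]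
--     max_alignment = []
--     max_run = []
--     while len(p1):
--         filter_ = [0 if "*" in primers else 1 for primers in zip(p1, p2)]
--         total, run, = dimerization_worker(
--             compress(p1, filter_),
--             compress(p2, filter_))
--         max_run.append(run)
--         max_alignment.append(total)
--         p1 = p1[:-1]
--         p2 = p2[1:]
--     return {
--         'total': max(max_alignment),
--         'run': max(max_run)}
--
-- HYBRID_SCORES = {'A': 2, 'T': 2, 'C':4, 'G': 4}
--
-- def dimerization_worker(primer_1, primer_2):
--     """
--     Returns the total score of complementary bases and the score of
--     the longest run of complementary bases.
--     """
--     complementary = [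
--         HYBRID_SCORES[s1] if s1 == s2 else 0 for s1, s2 in zip(
--             primer_1, primer_2)]
--     total = sum(complementary)
--     complementary_runs = [list(comp) for run, comp in groupby(
--         complementary, key=lambda x: x > 0)]
--     max_run = sum(max(complementary_runs, key=sum))
--     return (total, max_run)
-- ===== SOURCE B (Python) =====
-- HYBRID_SCORES = {'A': 2, 'T': 2, 'C': 4, 'G': 4}
--
-- def dimerization(primer_1, primer_2):
--     """Scan every alignment directly over the overlap of primer_1 and the
--     reversed primer_2, streaming the total and the best (score-weighted)
--     run; no padding, compress or groupby."""
--     r2 = primer_2[::-1]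
--     n, m = len(primer_1), len(r2)
--     best_total = best_run = 0
--     for t in range(n + m - 1):
--         lo = max(n - 1 - t, 0)
--         hi = min(n, n + m - 1 - t)
--         total = run = cur = 0
--         for i in range(lo, hi):
--             c1, c2 = primer_1[i], r2[i + t - (n - 1)]
--             if c1 == c2:
--                 s = HYBRID_SCORES[c1]
--                 total += s
--                 cur += s
--                 if cur > run:
--                     run = cur
--             else:
--                 cur = 0
--         if total > best_total:
--             best_total = total
--         if run > best_run:
--             best_run = run
--     return {'total': best_total, 'run': best_run}
-- ===== Notes on version B (the rewrite author's own statement) =====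
-- stated objective: simpler
-- what changed: B drops A's padded-string/itertools compress+groupby machinery entirely: for each alignment offset it computes the overlapping index range and scans primer_1 against reversed primer_2 directly, streaming the total and a running best-run score, keeping running maxima instead of building per-offset lists and groupby runs.
-- outside the precondition, e.g. on dimerization('A*A', 'AGA'): A returns {'total': 4, 'run': 4}, B returns {'total': 4, 'run': 2}
import Mathlib
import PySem

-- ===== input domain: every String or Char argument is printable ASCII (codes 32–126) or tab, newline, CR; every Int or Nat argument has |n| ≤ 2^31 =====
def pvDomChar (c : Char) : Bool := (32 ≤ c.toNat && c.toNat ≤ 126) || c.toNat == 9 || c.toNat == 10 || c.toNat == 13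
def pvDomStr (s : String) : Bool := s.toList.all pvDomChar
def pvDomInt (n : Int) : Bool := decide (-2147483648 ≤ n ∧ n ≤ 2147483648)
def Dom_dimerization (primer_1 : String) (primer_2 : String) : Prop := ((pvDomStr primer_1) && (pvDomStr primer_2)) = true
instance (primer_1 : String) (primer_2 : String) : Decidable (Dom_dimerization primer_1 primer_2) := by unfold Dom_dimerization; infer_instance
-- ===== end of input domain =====

-- B replaces A's padded-string/compress/groupby machinery by a direct scan of each
-- alignment's overlap with a streaming best-run tracker (objective: simpler).

-- ===== PORT A =====

-- HYBRID_SCORES[c]; the final 0 branch is where Python raises KeyError (excluded by Pre_)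
def pvScore (c : Char) : Int :=
  if c = 'A' then 2 else if c = 'T' then 2 else if c = 'C' then 4 else if c = 'G' then 4 else 0

-- itertools.compress(l, f) (selectors as Bools)
def pvCompress {α : Type} (l : List α) (f : List Bool) : List α :=
  (l.zip f).filterMap (fun p => if p.2 then some p.1 else none)

-- itertools.groupby(l, key=lambda x: x > 0), with each group materialized (key, list(comp))
def pvGroups : List Int → List (Bool × List Int)
  | [] => []
  | a :: t =>
    match pvGroups t with
    | [] => [(decide (0 < a), [a])]
    | (k, g) :: gs =>
      if decide (0 < a) = k then (decide (0 < a), a :: g) :: gs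
      else (decide (0 < a), [a]) :: (k, g) :: gs

-- dimerization_worker: total and score of the best (max-by-sum) run
-- max(runs, key=sum) on an empty list raises ValueError (excluded by Pre_): .getD [] unreached
def pvWorker (primer_1 primer_2 : List Char) : Int × Int :=
  let complementary := (primer_1.zip primer_2).map (fun p => if p.1 = p.2 then pvScore p.1 else 0)
  let total := complementary.sum
  let complementary_runs := (pvGroups complementary).map (fun g => g.2)
  let max_run := ((PySem.List.max? complementary_runs (fun g => g.sum)).getD []).sum
  (total, max_run)

-- the while-loop of A: trims p1 from the right, p2 from the left, appending (total, run)
def pvLoopA (p1 p2 : List Char) (accT accR : List Int) : List Int × List Int :=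
  if h : p1 = [] then (accT, accR)
  else
    let filt := (p1.zip p2).map (fun pr => if '*' = pr.1 ∨ '*' = pr.2 then false else true)
    let tr := pvWorker (pvCompress p1 filt) (pvCompress p2 filt)
    pvLoopA p1.dropLast p2.tail (accT ++ [tr.1]) (accR ++ [tr.2])
termination_by p1.length
decreasing_by simp [List.length_dropLast]; have := List.length_pos_of_ne_nil h; omega

-- max([]) raises ValueError (excluded by Pre_): .getD 0 unreached
def dimerization (primer_1 : String) (primer_2 : String) : List (String × Int) :=
  let p1 := primer_1.toList ++ List.replicate (primer_2.toList.length - 1) '*'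
  let p2 := List.replicate (primer_1.toList.length - 1) '*' ++ primer_2.toList.reverse
  let mtr := pvLoopA p1 p2 [] []
  [("total", (PySem.List.max? mtr.1 (fun x => x)).getD 0),
   ("run", (PySem.List.max? mtr.2 (fun x => x)).getD 0)]

-- ===== PORT B =====

-- inner loop of B over the overlap [lo, hi): state (total, run, cur);
-- both list indices are in range whenever the loop body runs
def pvInner (c1 r2 : List Char) (n t lo hi : Nat) : Int × Int × Int :=
  (List.range' lo (hi - lo)).foldl (fun s i =>
    let a := c1.getD i ' '
    let b := r2.getD (i + t + 1 - n) ' '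
    if a = b then
      let sc := pvScore a
      let cur := s.2.2 + sc
      (s.1 + sc, if s.2.1 < cur then cur else s.2.1, cur)
    else (s.1, s.2.1, 0)) (0, 0, 0)

def dimerization_alt (primer_1 : String) (primer_2 : String) : List (String × Int) :=
  let c1 := primer_1.toList
  let r2 := primer_2.toList.reverse
  let n := c1.length
  let m := r2.length
  let best := (List.range (n + m - 1)).foldl (fun (b : Int × Int) t =>
    let lo := n - 1 - t
    let hi := min n (n + m - 1 - t)
    let trc := pvInner c1 r2 n t lo hi
    ((if b.1 < trc.1 then trc.1 else b.1), (if b.2 < trc.2.1 then trc.2.1 else b.2))) (0, 0)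
  [("total", best.1), ("run", best.2)]

-- ===== PRECONDITION & SPEC =====

-- Pre_ excludes: empty primers (A raises ValueError from max([])), primers sharing a
-- character outside 'ATCG' (A raises KeyError when it matches), and primers containing
-- '*' — A's padding sentinel, whose collision with real data makes A silently drop
-- those positions and merge the adjacent runs, an artifact of the padding implementation.
def Pre_dimerization (primer_1 : String) (primer_2 : String) : Prop :=
  primer_1.toList ≠ [] ∧ primer_2.toList ≠ [] ∧
  '*' ∉ primer_1.toList ∧ '*' ∉ primer_2.toList ∧
  (primer_1.toList.all (fun c =>
    !(primer_2.toList.contains c) || (c == 'A' || c == 'T' || c == 'C' || c == 'G'))) = true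
instance (primer_1 : String) (primer_2 : String) : Decidable (Pre_dimerization primer_1 primer_2) := by
  unfold Pre_dimerization; infer_instance

def pvWitness_dimerization : String × String := ("AC", "AC")

def Spec_dimerization (primer_1 : String) (primer_2 : String) (out : List (String × Int)) : Prop := out = dimerization_alt primer_1 primer_2
instance (primer_1 : String) (primer_2 : String) (out : List (String × Int)) : Decidable (Spec_dimerization primer_1 primer_2 out) := by unfold Spec_dimerization; infer_instance

-- ===== CLAIM (what is proved, stated in full; the proofs are below) =====
def Claim_equal_dimerization : Prop := ∀ (primer_1 : String) (primer_2 : String), Dom_dimerization primer_1 primer_2 → Pre_dimerization primer_1 primer_2 → Spec_dimerization primer_1 primer_2 (dimerization primer_1 primer_2)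

-- ===== LEMMAS AND PROOFS =====

-- (if b < v then v else b) is max
theorem pv_if_lt_eq_max (b v : Int) : (if b < v then v else b) = max b v := by
  rw [max_def]; split_ifs <;> omega

-- the reference pair list scanned at offset t (shared shape of both sides)
def pvPairFn (c1 r2 : List Char) (n t : Nat) (i : Nat) : Char × Char :=
  (c1.getD i ' ', r2.getD (i + t + 1 - n) ' ')

-- per-pair score
def pvCompFn (p : Char × Char) : Int := if p.1 = p.2 then pvScore p.1 else 0

-- streaming step on pairs (the body of pvInner, as a function of the pair)
def pvStep (s : Int × Int × Int) (p : Char × Char) : Int × Int × Int :=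
  if p.1 = p.2 then
    let sc := pvScore p.1
    let cur := s.2.2 + sc
    (s.1 + sc, if s.2.1 < cur then cur else s.2.1, cur)
  else (s.1, s.2.1, 0)

-- right-recursion characterization of the best run: (best among runs after the
-- leading run, sum of the leading positive run)
def pvGRun : List Int → Int × Int
  | [] => (0, 0)
  | x :: t =>
    let p := pvGRun t
    if 0 < x then (p.1, x + p.2) else (max p.1 p.2, 0)

theorem pvGRun_nonneg (l : List Int) (h : ∀ x ∈ l, 0 ≤ x) : 0 ≤ (pvGRun l).1 ∧ 0 ≤ (pvGRun l).2 := by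
  induction l with
  | nil => simp [pvGRun]
  | cons a t ih =>
    have ht := ih (fun x hx => h x (List.mem_cons_of_mem _ hx))
    have ha := h a (List.mem_cons_self ..)
    simp only [pvGRun]
    split_ifs with h1
    · exact ⟨ht.1, by omega⟩
    · constructor
      · exact le_max_of_le_left ht.1
      · omega

theorem pvCompress_map_filter {α : Type} (l : List α) (sel : α → Bool) :
    pvCompress l (l.map sel) = l.filter sel := by
  induction l with
  | nil => rfl
  | cons a t ih =>
    simp only [pvCompress, List.map_cons, List.zip_cons_cons, List.filterMap_cons, List.filter_cons] at *
    cases hs : sel a <;> simp [ih]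

theorem pvCompress_zip {α β : Type} (a : List α) (b : List β) (f : List Bool) :
    (pvCompress a f).zip (pvCompress b f) = pvCompress (a.zip b) f := by
  induction a generalizing b f with
  | nil => simp [pvCompress]
  | cons x a' ih =>
    cases b with
    | nil => simp [pvCompress]
    | cons y b' =>
      cases f with
      | nil => simp [pvCompress]
      | cons g f' =>
        cases g <;> simp [pvCompress] at * <;>
          simpa [pvCompress] using ih b' f'

theorem pv_filter_range_interval (N lo hi : Nat) :
    (List.range N).filter (fun pos => decide (lo ≤ pos ∧ pos < hi)) = List.range' lo (min hi N - lo) := by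
  induction N with
  | zero => simp
  | succ N ih =>
    rw [List.range_succ, List.filter_append, ih]
    by_cases hc : lo ≤ N ∧ N < hi
    · have h1 : min hi N - lo = N - lo := by omega
      have h2 : min hi (N+1) - lo = (N - lo) + 1 := by omega
      rw [h1, h2, List.range'_1_concat]
      simp [hc.1, hc.2]
    · have h2 : min hi (N+1) - lo = min hi N - lo := by omega
      rw [h2]
      simp only [List.filter_cons, List.filter_nil]
      rw [if_neg (by simpa using hc)]
      simp

theorem pvGroups_ne_nil (l : List Int) (h : l ≠ []) : pvGroups l ≠ [] := by
  cases l with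
  | nil => exact absurd rfl h
  | cons a t =>
    simp only [pvGroups]
    rcases hg : pvGroups t with _ | ⟨⟨k, g⟩, gs⟩
    · simp
    · dsimp only
      split_ifs <;> simp
theorem pvGroups_inv (l : List Int) (hpos : ∀ x ∈ l, 0 ≤ x) :
    ∀ k g gs, pvGroups l = (k, g) :: gs →
      ((pvGRun l).2 = if k then g.sum else 0) ∧
      g.sum ≤ max (pvGRun l).1 (pvGRun l).2 ∧
      (∀ s ∈ gs.map (fun q => q.2.sum), s ≤ (pvGRun l).1) ∧
      max (pvGRun l).1 (pvGRun l).2 ∈ ((k, g) :: gs).map (fun q => q.2.sum) := by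
  induction l with
  | nil => intro k g gs h; simp [pvGroups] at h
  | cons a t ih =>
    intro k g gs h
    have ha : 0 ≤ a := hpos a (List.mem_cons_self ..)
    have hpt : ∀ x ∈ t, 0 ≤ x := fun x hx => hpos x (List.mem_cons_of_mem _ hx)
    have hrt := pvGRun_nonneg t hpt
    rcases hg : pvGroups t with _ | ⟨⟨k', g'⟩, gs'⟩
    · -- t = []
      have ht : t = [] := by
        by_contra hne; exact pvGroups_ne_nil t hne hg
      subst ht
      simp only [pvGroups] at h
      obtain ⟨⟨hk, hgg⟩, hgs⟩ : (decide (0 < a) = k ∧ [a] = g) ∧ gs = [] := by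
        simpa using h
      subst hk hgg hgs
      by_cases h0 : 0 < a
      · simp [pvGRun, h0, ha]
      · have ha0 : a = 0 := by omega
        simp [pvGRun, ha0]
    · have IH := ih hpt k' g' gs' hg
      obtain ⟨ih1, ih2, ih3, ih4⟩ := IH
      simp only [pvGroups, hg] at h
      by_cases hak : decide (0 < a) = k'
      · rw [if_pos hak] at h
        obtain ⟨⟨hk, hgg⟩, hgs⟩ : (decide (0 < a) = k ∧ a :: g' = g) ∧ gs' = gs := by
          simpa using h
        subst hk hgg hgs
        by_cases h0 : 0 < a
        · -- merge into a positive head group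
          have hk' : k' = true := by rw [← hak]; simp [h0]
          rw [hk', if_pos rfl] at ih1
          simp only [pvGRun, if_pos h0, List.sum_cons, List.map_cons, List.mem_cons]
          refine ⟨by simp [h0, ih1], by rw [ih1]; exact le_max_right _ _, ih3, ?_⟩
          by_cases hle : (pvGRun t).1 ≤ a + (pvGRun t).2
          · left; rw [max_eq_right hle, ih1]
          · push_neg at hle
            have hmax : max (pvGRun t).1 (a + (pvGRun t).2) = (pvGRun t).1 :=
              max_eq_left (le_of_lt hle)
            rw [hmax]
            have hold : max (pvGRun t).1 (pvGRun t).2 = (pvGRun t).1 :=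
              max_eq_left (by omega)
            rw [hold, List.map_cons, List.mem_cons] at ih4
            rcases ih4 with h1 | h1
            · exfalso; rw [← ih1] at h1; omega
            · right; exact h1
        · -- a = 0 merged into a zero head group
          have ha0 : a = 0 := by omega
          have hk' : k' = false := by rw [← hak]; simp [h0]
          rw [hk', if_neg (by simp)] at ih1
          simp only [pvGRun, if_neg h0, List.sum_cons, List.map_cons, List.mem_cons]
          have hmm : max (max (pvGRun t).1 (pvGRun t).2) (0:Int) = max (pvGRun t).1 (pvGRun t).2 :=
            max_eq_left (le_max_of_le_left hrt.1)
          refine ⟨by simp [h0], ?_, ?_, ?_⟩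
          · rw [hmm, ha0, zero_add]; exact ih2
          · intro s hs; exact le_trans (ih3 s hs) (le_max_left _ _)
          · rw [hmm, ha0, zero_add]
            rw [List.map_cons, List.mem_cons] at ih4
            exact ih4
      · rw [if_neg hak] at h
        obtain ⟨⟨hk, hgg⟩, hgs⟩ : (decide (0 < a) = k ∧ [a] = g) ∧ (k', g') :: gs' = gs := by
          simpa using h
        subst hk hgg hgs
        by_cases h0 : 0 < a
        · -- new positive singleton group before a zero group
          have hk' : k' = false := by
            cases k' with
            | false => rfl
            | true => exact absurd (by simp [h0]) hak
          rw [hk', if_neg (by simp)] at ih1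
          have hrt1 : max (pvGRun t).1 (pvGRun t).2 = (pvGRun t).1 := max_eq_left (by omega)
          simp only [pvGRun, if_pos h0, List.sum_cons, List.map_cons, List.mem_cons]
          refine ⟨by simp [h0, ih1], ?_, ?_, ?_⟩
          · rw [ih1]; exact le_max_right _ _
          · intro s hs
            rcases hs with h1 | h1
            · subst h1; rw [← hrt1]; exact ih2
            · exact ih3 _ (by simpa using h1)
          · rw [ih1, add_zero]
            by_cases hle : (pvGRun t).1 ≤ a
            · left; rw [max_eq_right hle]; simp [List.sum_nil]
            · push_neg at hle
              rw [max_eq_left (le_of_lt hle)]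
              right; rw [← hrt1]
              rw [List.map_cons, List.mem_cons] at ih4
              simpa using ih4
        · -- new zero singleton group before a positive group
          have ha0 : a = 0 := by omega
          have hk' : k' = true := by
            cases k' with
            | true => rfl
            | false => exact absurd (by simp [h0]) hak
          rw [hk', if_pos rfl] at ih1
          have hmm : max (max (pvGRun t).1 (pvGRun t).2) (0:Int) = max (pvGRun t).1 (pvGRun t).2 :=
            max_eq_left (le_max_of_le_left hrt.1)
          simp only [pvGRun, if_neg h0, List.sum_cons, List.map_cons, List.mem_cons]
          refine ⟨by simp [h0], ?_, ?_, ?_⟩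
          · have : a + List.sum ([]:List Int) = 0 := by simp [ha0]
            rw [this]
            exact le_max_of_le_left (le_max_of_le_left hrt.1)
          · intro s hs
            rcases hs with h1 | h1
            · subst h1; rw [← ih1]; exact le_max_right _ _
            · exact le_trans (ih3 _ (by simpa using h1)) (le_max_left _ _)
          · rw [hmm]
            right
            rw [List.map_cons, List.mem_cons] at ih4
            simpa using ih4
theorem pvWorker_run_eq (l : List Int) (hpos : ∀ x ∈ l, 0 ≤ x) :
    ((PySem.List.max? ((pvGroups l).map (fun g => g.2)) (fun g => g.sum)).getD []).sum
      = max (pvGRun l).1 (pvGRun l).2 := by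
  rcases hl : l with _ | ⟨a, t⟩
  · simp [pvGroups, pvGRun, PySem.List.max?]
  · rw [← hl]
    have hne : l ≠ [] := by rw [hl]; simp
    rcases hg : pvGroups l with _ | ⟨⟨k, g⟩, gs⟩
    · exact absurd hg (pvGroups_ne_nil l hne)
    obtain ⟨ih1, ih2, ih3, ih4⟩ := pvGroups_inv l hpos k g gs hg
    rcases hm : PySem.List.max? (((k, g) :: gs).map (fun q => q.2)) (fun q => q.sum) with _ | m
    · rw [PySem.List.max?_eq_none_iff] at hm; simp at hm
    have hmem := PySem.List.max?_mem hm
    have hmax := PySem.List.max?_isMax hm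
    rw [hm]
    simp only [Option.getD_some]
    apply le_antisymm
    · -- m.sum ≤ max r1 r2
      simp only [List.map_cons, List.mem_cons] at hmem
      rcases hmem with h1 | h1
      · subst h1; exact ih2
      · rw [List.mem_map] at h1
        obtain ⟨q, hq, hq2⟩ := h1
        subst hq2
        exact le_trans (ih3 q.2.sum (List.mem_map_of_mem hq)) (le_max_left _ _)
    · -- max r1 r2 ≤ m.sum
      simp only [List.map_cons, List.mem_cons] at ih4
      rcases ih4 with h1 | h1
      · rw [h1]; exact hmax g (by simp)
      · rw [List.mem_map] at h1
        obtain ⟨q, hq, hq2⟩ := h1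
        rw [← hq2]
        exact hmax q.2 (by rw [List.map_cons]; exact List.mem_cons_of_mem _ (List.mem_map_of_mem hq))

theorem pvStep_total (l : List (Char × Char)) : ∀ (tt b c : Int),
    (l.foldl pvStep (tt, b, c)).1 = tt + (l.map pvCompFn).sum := by
  induction l with
  | nil => simp
  | cons p t ih =>
    intro tt b c
    by_cases h : p.1 = p.2
    · simp only [List.foldl_cons, List.map_cons, List.sum_cons, pvStep, pvCompFn, if_pos h]
      rw [ih]; ring
    · simp only [List.foldl_cons, List.map_cons, List.sum_cons, pvStep, pvCompFn, if_neg h]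
      rw [ih tt b 0]; ring

theorem pvStep_best (l : List (Char × Char)) (hl : ∀ p ∈ l, p.1 = p.2 → 0 < pvScore p.1) :
    ∀ (tt b c : Int), 0 ≤ c → c ≤ b →
    (l.foldl pvStep (tt, b, c)).2.1
      = max b (max (c + (pvGRun (l.map pvCompFn)).2) (pvGRun (l.map pvCompFn)).1) := by
  induction l with
  | nil => intro tt b c h1 h2; simp [pvGRun]; omega
  | cons p t ih =>
    intro tt b c h1 h2
    have hpt : ∀ q ∈ t, q.1 = q.2 → 0 < pvScore q.1 := fun q hq => hl q (List.mem_cons_of_mem _ hq)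
    have hgn := pvGRun_nonneg (t.map pvCompFn) (by
      intro x hx
      rw [List.mem_map] at hx
      obtain ⟨q, hq, hq2⟩ := hx
      rw [← hq2]
      unfold pvCompFn
      split_ifs with he
      · exact le_of_lt (hpt q hq he)
      · exact le_refl 0)
    by_cases hpp : p.1 = p.2
    · have hsc : 0 < pvScore p.1 := hl p (List.mem_cons_self ..) hpp
      simp only [List.foldl_cons, List.map_cons, pvStep, pvCompFn, if_pos hpp]
      rw [pv_if_lt_eq_max]
      rw [ih hpt (tt + pvScore p.1) (max b (c + pvScore p.1)) (c + pvScore p.1)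
            (by omega) (le_max_right _ _)]
      simp only [pvGRun, if_pos hsc]
      simp only [max_def]
      split_ifs <;> omega
    · simp only [List.foldl_cons, List.map_cons, pvStep, pvCompFn, if_neg hpp]
      rw [ih hpt tt b 0 (le_refl 0) (by omega)]
      have h0 : ¬ (0:Int) < 0 := by omega
      simp only [pvGRun, if_neg h0]
      simp only [max_def]
      split_ifs <;> omega

theorem pv_max_getD_eq_foldl (l : List Int) (h : ∀ x ∈ l, 0 ≤ x) :
    (PySem.List.max? l (fun x => x)).getD 0 = l.foldl (fun b v => if b < v then v else b) 0 := by
  have hfx : ∀ (b : Int) (l' : List Int), l'.foldl (fun b v => if b < v then v else b) b = l'.foldl max b := by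
    intro b l'
    congr 1
    funext x y
    exact pv_if_lt_eq_max x y
  rcases l with _ | ⟨x, t⟩
  · simp [PySem.List.max?]
  · rw [PySem.List.max?_id_cons]
    simp only [Option.getD_some]
    rw [hfx, List.foldl_cons]
    have : max (0:Int) x = x := max_eq_right (h x (by simp))
    rw [this]
-- A's per-iteration value as a function of the offset k
def pvOff (P1 P2 : List Char) (k : Nat) : Int × Int :=
  let p1 := P1.take (P1.length - k)
  let p2 := P2.drop k
  let filt := (p1.zip p2).map (fun pr => if '*' = pr.1 ∨ '*' = pr.2 then false else true)
  pvWorker (pvCompress p1 filt) (pvCompress p2 filt)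

theorem pv_dropLast_take {α : Type} (l : List α) (n : Nat) (h : n + 1 ≤ l.length) :
    (l.take (n+1)).dropLast = l.take n := by
  rw [List.dropLast_eq_take, List.length_take, List.take_take]
  congr 1
  omega

theorem pvLoopA_spec (P1 P2 : List Char) (n : Nat) :
    ∀ (j : Nat) (accT accR : List Int), j + n = P1.length →
    pvLoopA (P1.take n) (P2.drop j) accT accR
      = (accT ++ (List.range' j n).map (fun k => (pvOff P1 P2 k).1),
         accR ++ (List.range' j n).map (fun k => (pvOff P1 P2 k).2)) := by
  induction n with
  | zero => intro j accT accR hj; rw [pvLoopA]; simp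
  | succ n ih =>
    intro j accT accR hj
    have hne : P1.take (n+1) ≠ [] := by
      have : P1 ≠ [] := by
        intro hc; rw [hc] at hj; simp at hj
      simp [List.take_eq_nil_iff, this]
    rw [pvLoopA, dif_neg hne]
    have hd : (P1.take (n+1)).dropLast = P1.take n := pv_dropLast_take P1 n (by omega)
    have ht : (P2.drop j).tail = P2.drop (j+1) := List.tail_drop
    rw [hd, ht, ih (j+1) _ _ (by omega)]
    have hoff : P1.length - j = n + 1 := by omega
    have : pvWorker
        (pvCompress (P1.take (n+1)) ((( P1.take (n+1)).zip (P2.drop j)).map (fun pr => if '*' = pr.1 ∨ '*' = pr.2 then false else true)))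
        (pvCompress (P2.drop j) ((( P1.take (n+1)).zip (P2.drop j)).map (fun pr => if '*' = pr.1 ∨ '*' = pr.2 then false else true)))
        = pvOff P1 P2 j := by
      unfold pvOff
      rw [hoff]
    rw [this]
    rw [List.range'_succ, List.map_cons, List.map_cons]
    simp [List.append_assoc]

-- the zipped-compressed pair list at offset k is exactly the overlap scan
theorem pvOff_pairs (c1 r2 : List Char) (hn : c1 ≠ []) (hm : r2 ≠ []) (hs1 : '*' ∉ c1)
    (hs2 : '*' ∉ r2) (k : Nat) (hk : k < c1.length + r2.length - 1) :
    (let P1 := c1 ++ List.replicate (r2.length - 1) '*'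
     let P2 := List.replicate (c1.length - 1) '*' ++ r2
     let p1 := P1.take (P1.length - k)
     let p2 := P2.drop k
     let filt := (p1.zip p2).map (fun pr => if '*' = pr.1 ∨ '*' = pr.2 then false else true)
     (pvCompress p1 filt).zip (pvCompress p2 filt))
    = (List.range' (c1.length - 1 - k)
         (min c1.length (c1.length + r2.length - 1 - k) - (c1.length - 1 - k))).map
        (pvPairFn c1 r2 c1.length k) := by
  have hn1 : 1 ≤ c1.length := List.length_pos_of_ne_nil hn
  have hm1 : 1 ≤ r2.length := List.length_pos_of_ne_nil hm
  set n := c1.length with hnn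
  set m := r2.length with hmm
  set L := n + m - 1 with hL
  set P1 := c1 ++ List.replicate (m - 1) '*' with hP1
  set P2 := List.replicate (n - 1) '*' ++ r2 with hP2
  have hP1l : P1.length = L := by simp [hP1, hL]; omega
  have hP2l : P2.length = L := by simp [hP2, hL]; omega
  set N := L - k with hN
  have hzip : (P1.take (P1.length - k)).zip (P2.drop k)
      = (List.range N).map (fun pos => (P1.getD pos ' ', P2.getD (pos + k) ' ')) := by
    apply List.ext_getElem
    · simp [List.length_zip, hP1l, hP2l, hN]
    · intro i h1 h2
      have hiN : i < N := by simpa using h2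
      have hiL : i < L - k := hiN
      simp only [List.getElem_zip, List.getElem_take, List.getElem_drop, List.getElem_map,
        List.getElem_range]
      rw [List.getD_eq_getElem P1 ' ' (by rw [hP1l]; omega),
          List.getD_eq_getElem P2 ' ' (by rw [hP2l]; omega)]
      simp [Nat.add_comm]
  simp only []
  rw [pvCompress_zip, hzip]
  rw [pvCompress_map_filter, List.filter_map]
  have hsel : ∀ pos ∈ List.range N,
      ((fun pr => if '*' = pr.1 ∨ '*' = pr.2 then false else true) ∘
        (fun pos => (P1.getD pos ' ', P2.getD (pos + k) ' '))) pos
      = decide ((n - 1 - k) ≤ pos ∧ pos < min n (L - k)) := by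
    intro pos hpos
    rw [List.mem_range] at hpos
    simp only [Function.comp]
    by_cases hpn : pos < n
    · have h1 : P1.getD pos ' ' = c1[pos]'(by omega) := by
        rw [hP1, List.getD_append _ _ _ _ (by omega), List.getD_eq_getElem c1 ' ' (by omega)]
      have h1s : ¬ ('*' = c1[pos]'(by omega)) := by
        intro hc; exact hs1 (hc ▸ List.getElem_mem _)
      by_cases hp2 : n - 1 ≤ pos + k
      · have hj : pos + k - (n - 1) < m := by omega
        have h2 : P2.getD (pos + k) ' ' = r2[pos + k - (n - 1)]'hj := by
          rw [hP2, List.getD_append_right _ _ _ _ (by simp; omega)]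
          simp only [List.length_replicate]
          rw [List.getD_eq_getElem r2 ' ' (by omega)]
        have h2s : ¬ ('*' = r2[pos + k - (n - 1)]'hj) := by
          intro hc; exact hs2 (hc ▸ List.getElem_mem _)
        simp only [h1, h2]
        rw [if_neg (by tauto)]
        exact (decide_eq_true (by constructor <;> omega)).symm
      · have h2 : P2.getD (pos + k) ' ' = '*' := by
          rw [hP2, List.getD_append _ _ _ _ (by simp; omega),
            List.getD_eq_getElem _ ' ' (by simp; omega), List.getElem_replicate]
        simp only [h2]
        rw [if_pos (by right; trivial)]
        exact (decide_eq_false (by omega)).symm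
    · have h1 : P1.getD pos ' ' = '*' := by
        rw [hP1, List.getD_append_right _ _ _ _ (by omega),
          List.getD_eq_getElem _ ' ' (by simp; omega), List.getElem_replicate]
      simp only [h1]
      rw [if_pos (by left; trivial)]
      exact (decide_eq_false (by omega)).symm
  rw [List.filter_congr hsel, pv_filter_range_interval,
    show min (min n (L - k)) N - (n - 1 - k) = min n (L - k) - (n - 1 - k) from by omega]
  apply List.map_congr_left
  intro pos hpos
  rw [List.mem_range'_1] at hpos
  have hlo : n - 1 - k ≤ pos := hpos.1
  have hhi : pos < min n (L - k) := by omega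
  unfold pvPairFn
  have e1 : P1.getD pos ' ' = c1.getD pos ' ' :=
    List.getD_append _ _ _ _ (by omega)
  have e2 : P2.getD (pos + k) ' ' = r2.getD (pos + k + 1 - n) ' ' := by
    rw [hP2, List.getD_append_right _ _ _ _ (by simp; omega)]
    simp only [List.length_replicate]
    congr 1
    omega
  rw [e1, e2]

theorem pvInner_eq_foldl (c1 r2 : List Char) (n t lo hi : Nat) :
    pvInner c1 r2 n t lo hi
      = ((List.range' lo (hi - lo)).map (pvPairFn c1 r2 n t)).foldl pvStep (0, 0, 0) := by
  rw [List.foldl_map]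
  rfl

theorem pvWorker_eq (pl : List (Char × Char)) (a b : List Char) (hz : a.zip b = pl)
    (hl : ∀ p ∈ pl, p.1 = p.2 → 0 < pvScore p.1) :
    pvWorker a b = ((pl.foldl pvStep (0, 0, 0)).1, (pl.foldl pvStep (0, 0, 0)).2.1) := by
  have hcomp : (a.zip b).map (fun p => if p.1 = p.2 then pvScore p.1 else 0) = pl.map pvCompFn := by
    rw [hz]; rfl
  have hnn : ∀ x ∈ pl.map pvCompFn, 0 ≤ x := by
    intro x hx
    rw [List.mem_map] at hx
    obtain ⟨q, hq, hq2⟩ := hx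
    rw [← hq2]
    unfold pvCompFn
    split_ifs with he
    · exact le_of_lt (hl q hq he)
    · exact le_refl 0
  have hg := pvGRun_nonneg (pl.map pvCompFn) hnn
  simp only [pvWorker]
  rw [hcomp]
  have ht := pvStep_total pl 0 0 0
  have hb := pvStep_best pl hl 0 0 0 (le_refl 0) (le_refl 0)
  rw [pvWorker_run_eq (pl.map pvCompFn) hnn]
  rw [Prod.ext_iff]
  constructor
  · simpa using ht.symm
  · simp only
    rw [hb]
    simp only [max_def]
    split_ifs <;> omega
-- per-offset: A's compress/groupby worker value = B's streaming inner loop (with nonnegativity)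
theorem pvOff_eq_inner (c1 r2 : List Char) (hn : c1 ≠ []) (hm : r2 ≠ []) (hs1 : '*' ∉ c1)
    (hs2 : '*' ∉ r2)
    (hmatch : ∀ (i j : Nat) (hi : i < c1.length) (hj : j < r2.length),
      c1[i] = r2[j] → 0 < pvScore (c1[i]'hi))
    (k : Nat) (hk : k < c1.length + r2.length - 1) :
    pvOff (c1 ++ List.replicate (r2.length - 1) '*') (List.replicate (c1.length - 1) '*' ++ r2) k
        = ((pvInner c1 r2 c1.length k (c1.length - 1 - k)
              (min c1.length (c1.length + r2.length - 1 - k))).1,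
           (pvInner c1 r2 c1.length k (c1.length - 1 - k)
              (min c1.length (c1.length + r2.length - 1 - k))).2.1)
      ∧ 0 ≤ (pvInner c1 r2 c1.length k (c1.length - 1 - k)
              (min c1.length (c1.length + r2.length - 1 - k))).1
      ∧ 0 ≤ (pvInner c1 r2 c1.length k (c1.length - 1 - k)
              (min c1.length (c1.length + r2.length - 1 - k))).2.1 := by
  have hn1 : 1 ≤ c1.length := List.length_pos_of_ne_nil hn
  have hm1 : 1 ≤ r2.length := List.length_pos_of_ne_nil hm
  set pl := (List.range' (c1.length - 1 - k)
      (min c1.length (c1.length + r2.length - 1 - k) - (c1.length - 1 - k))).map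
      (pvPairFn c1 r2 c1.length k) with hpl
  have hl : ∀ p ∈ pl, p.1 = p.2 → 0 < pvScore p.1 := by
    intro p hp
    rw [hpl, List.mem_map] at hp
    obtain ⟨i, hi, hip⟩ := hp
    rw [List.mem_range'_1] at hi
    have hi1 : i < c1.length := by omega
    have hj1 : i + k + 1 - c1.length < r2.length := by omega
    rw [← hip]
    unfold pvPairFn
    simp only
    rw [List.getD_eq_getElem c1 ' ' hi1, List.getD_eq_getElem r2 ' ' hj1]
    exact hmatch i _ hi1 hj1
  have hz := pvOff_pairs c1 r2 hn hm hs1 hs2 k hk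
  have hw := pvWorker_eq pl _ _ hz hl
  have hfold : pvInner c1 r2 c1.length k (c1.length - 1 - k)
      (min c1.length (c1.length + r2.length - 1 - k)) = pl.foldl pvStep (0, 0, 0) :=
    pvInner_eq_foldl c1 r2 c1.length k _ _
  constructor
  · unfold pvOff
    rw [hw, hfold]
  · rw [hfold]
    have hnn : ∀ x ∈ pl.map pvCompFn, 0 ≤ x := by
      intro x hx
      rw [List.mem_map] at hx
      obtain ⟨q, hq, hq2⟩ := hx
      rw [← hq2]
      unfold pvCompFn
      split_ifs with he
      · exact le_of_lt (hl q hq he)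
      · exact le_refl 0
    constructor
    · rw [pvStep_total pl 0 0 0]
      have := List.sum_nonneg hnn
      omega
    · rw [pvStep_best pl hl 0 0 0 (le_refl 0) (le_refl 0)]
      exact le_max_left _ _
theorem dimerization_spec : Claim_equal_dimerization := by
  unfold Claim_equal_dimerization
  intro s1 s2 hdom hpre
  unfold Spec_dimerization
  obtain ⟨hne1, hne2, hst1, hst2, hcommb⟩ := hpre
  have hcomm : ∀ c ∈ s1.toList, c ∈ s2.toList → (c = 'A' ∨ c = 'T' ∨ c = 'C' ∨ c = 'G') := by
    intro c hc hc2
    have := (List.all_eq_true.mp hcommb) c hc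
    simp [hc2] at this
    tauto
  have hne2r : s2.toList.reverse ≠ [] := by simpa using hne2
  have hst2r : '*' ∉ s2.toList.reverse := by simpa using hst2
  have hmatch : ∀ (i j : Nat) (hi : i < s1.toList.length) (hj : j < s2.toList.reverse.length),
      s1.toList[i] = s2.toList.reverse[j] → 0 < pvScore (s1.toList[i]'hi) := by
    intro i j hi hj he
    have h2 : s1.toList[i]'hi ∈ s2.toList := by
      rw [he]; exact List.mem_reverse.mp (List.getElem_mem _)
    rcases hcomm _ (List.getElem_mem _) h2 with h | h | h | h <;> simp [pvScore, h]
  have hn1 : 1 ≤ s1.toList.length := List.length_pos_of_ne_nil hne1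
  have hm1 : 1 ≤ s2.toList.length := by
    have := List.length_pos_of_ne_nil hne2; omega
  simp only [dimerization, dimerization_alt, List.length_reverse]
  have hL1 : (s1.toList ++ List.replicate (s2.toList.length - 1) '*').length
      = s1.toList.length + s2.toList.length - 1 := by
    rw [List.length_append, List.length_replicate]; omega
  have hloop := pvLoopA_spec (s1.toList ++ List.replicate (s2.toList.length - 1) '*')
    (List.replicate (s1.toList.length - 1) '*' ++ s2.toList.reverse)
    ((s1.toList ++ List.replicate (s2.toList.length - 1) '*').length) 0 [] [] (by omega)
  rw [List.take_length, List.drop_zero] at hloop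
  rw [hloop, hL1]
  simp only [List.nil_append]
  have hoff := fun (k : Nat) (hk : k < s1.toList.length + s2.toList.length - 1) =>
    pvOff_eq_inner s1.toList s2.toList.reverse hne1 hne2r hst1 hst2r hmatch k
      (by rw [List.length_reverse]; omega)
  simp only [List.length_reverse] at hoff
  rw [List.range_eq_range']
  rw [PySem.List.foldl_prod_mk
    (f := fun (b1 : Int) t => if b1 < (pvInner s1.toList s2.toList.reverse s1.toList.length t
        (s1.toList.length - 1 - t)
        (min s1.toList.length (s1.toList.length + s2.toList.length - 1 - t))).1
      then (pvInner s1.toList s2.toList.reverse s1.toList.length t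
        (s1.toList.length - 1 - t)
        (min s1.toList.length (s1.toList.length + s2.toList.length - 1 - t))).1 else b1)
    (g := fun (b2 : Int) t => if b2 < (pvInner s1.toList s2.toList.reverse s1.toList.length t
        (s1.toList.length - 1 - t)
        (min s1.toList.length (s1.toList.length + s2.toList.length - 1 - t))).2.1
      then (pvInner s1.toList s2.toList.reverse s1.toList.length t
        (s1.toList.length - 1 - t)
        (min s1.toList.length (s1.toList.length + s2.toList.length - 1 - t))).2.1 else b2)]
  simp only [List.cons.injEq, Prod.mk.injEq, and_true, true_and]
  constructor
  · rw [pv_max_getD_eq_foldl _ (by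
      intro x hx
      rw [List.mem_map] at hx
      obtain ⟨k, hk, hkx⟩ := hx
      rw [List.mem_range'_1] at hk
      obtain ⟨heq, hnn1, hnn2⟩ := hoff k (by omega)
      rw [← hkx, heq]
      exact hnn1)]
    rw [List.foldl_map]
    apply PySem.List.foldl_congr_mem
    intro acc k hk
    rw [List.mem_range'_1] at hk
    obtain ⟨heq, _, _⟩ := hoff k (by omega)
    simp only [heq]
  · rw [pv_max_getD_eq_foldl _ (by
      intro x hx
      rw [List.mem_map] at hx
      obtain ⟨k, hk, hkx⟩ := hx
      rw [List.mem_range'_1] at hk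
      obtain ⟨heq, hnn1, hnn2⟩ := hoff k (by omega)
      rw [← hkx, heq]
      exact hnn2)]
    rw [List.foldl_map]
    apply PySem.List.foldl_congr_mem
    intro acc k hk
    rw [List.mem_range'_1] at hk
    obtain ⟨heq, _, _⟩ := hoff k (by omega)
    simp only [heq]
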